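-- pv_equiv track=rewrite | github.com/MinisterYu/fucking-algorithm | 练习题/回溯法/z5LCP23魔术排列.py | isMagic1
-- ===== SOURCE A (Python) =====
-- from typing import List
--
-- def isMagic1(target: List[int]) -> bool:
--     n = len(target)
--
--     def help(target, k):
--         nums = sorted(target)
--         res = []
--
--         while nums:
--             nums = nums[1::2] + nums[::2]
--             res += nums[:k]
--             nums = nums[k:]
--
--         return res == target
--
--     for i in range(1, len(target)):
--         if help(target, i):
--             return True
--     return False
-- ===== SOURCE B (Python) =====
-- def isMagic1(target):
--     n = len(target)
--     s = sorted(target)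
--     first = s[1::2] + s[::2]
--     # longest common prefix of the first shuffle and target: any working k must be <= p
--     p = 0
--     while p < n and first[p] == target[p]:
--         p += 1
--     for k in range(min(p, n - 1), 0, -1):
--         # stream-verify k against target without building the whole result
--         nums, rest, ok = s, target, True
--         while nums and ok:
--             nums = nums[1::2] + nums[::2]
--             ok = nums[:k] == rest[:k]
--             nums, rest = nums[k:], rest[k:]
--         if ok and not rest:
--             return True
--     return False
-- ===== Notes on version B (the rewrite author's own statement) =====
-- stated objective: faster
-- what changed: Instead of fully simulating the shuffle process for every k from 1 to n-1 (re-sorting each time), B sorts once, bounds the candidate k by the common prefix length of the first shuffle with target (any working k must lie there), and verifies candidates by a streaming comparison with early exit.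
import Mathlib
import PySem

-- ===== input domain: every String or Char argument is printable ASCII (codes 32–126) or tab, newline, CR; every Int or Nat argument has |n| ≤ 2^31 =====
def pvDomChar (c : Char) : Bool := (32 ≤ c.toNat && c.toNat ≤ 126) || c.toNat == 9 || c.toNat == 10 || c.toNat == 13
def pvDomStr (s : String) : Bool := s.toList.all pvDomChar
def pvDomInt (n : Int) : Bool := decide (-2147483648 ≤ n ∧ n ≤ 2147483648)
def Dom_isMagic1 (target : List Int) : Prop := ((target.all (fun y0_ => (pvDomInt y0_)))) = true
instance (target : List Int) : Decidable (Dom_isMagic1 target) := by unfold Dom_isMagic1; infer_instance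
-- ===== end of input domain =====

-- B sorts once, bounds the candidate k by the common prefix of the first shuffle with target,
-- and stream-verifies with early exit, instead of A's full simulation (with a fresh sort) for every k.

-- shared transliteration of the expression 'nums[1::2] + nums[::2]' both Pythons contain
def pyShuffle (nums : List Int) : List Int :=
  ((PySem.List.slice? nums (some 1) none 2).getD []) ++ ((PySem.List.slice? nums none none 2).getD [])

-- ===== PORT A =====
-- the 'while nums:' loop of help; fuel = len(nums)+1 suffices since k ≥ 1 (guard only, for totality)
def helpLoopA : Nat → Int → List Int → List Int → List Int
  | 0, _, _, res => res
  | fuel+1, k, nums, res =>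
    if nums.isEmpty then res
    else
      let m := pyShuffle nums
      helpLoopA fuel k (PySem.List.slice m (some k) none) (res ++ PySem.List.slice m none (some k))

def helpA (target : List Int) (k : Int) : Bool :=
  let nums := PySem.List.sorted target (fun x => x) false
  decide (helpLoopA (nums.length + 1) k nums [] = target)

def isMagic1 (target : List Int) : Bool :=
  (PySem.List.pyRange 1 (target.length : Int) 1).any (fun i => helpA target i)

-- ===== PORT B =====
-- 'p = 0; while p < n and first[p] == target[p]: p += 1'
def prefLen : List Int → List Int → Nat
  | a :: xs, b :: ys => if a = b then prefLen xs ys + 1 else 0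
  | _, _ => 0

-- 'while nums and ok: …' with early exit; returns 'ok and not rest'
def verifyLoopB : Nat → Int → List Int → List Int → Bool
  | 0, _, _, rest => rest.isEmpty
  | fuel+1, k, nums, rest =>
    if nums.isEmpty then rest.isEmpty
    else
      let m := pyShuffle nums
      if PySem.List.slice m none (some k) = PySem.List.slice rest none (some k) then
        verifyLoopB fuel k (PySem.List.slice m (some k) none) (PySem.List.slice rest (some k) none)
      else false

def isMagic1_alt (target : List Int) : Bool :=
  let n := target.length
  let s := PySem.List.sorted target (fun x => x) false
  let first := pyShuffle s
  let p := prefLen first target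
  (PySem.List.pyRange (min (p : Int) ((n : Int) - 1)) 0 (-1)).any
    (fun k => verifyLoopB (s.length + 1) k s target)

-- ===== PRECONDITION & SPEC =====
def Spec_isMagic1 (target : List Int) (out : Bool) : Prop := out = isMagic1_alt target
instance (target : List Int) (out : Bool) : Decidable (Spec_isMagic1 target out) := by unfold Spec_isMagic1; infer_instance

-- ===== CLAIM (what is proved, stated in full; the proofs are below) =====
def Claim_equal_isMagic1 : Prop := ∀ (target : List Int), Dom_isMagic1 target → Spec_isMagic1 target (isMagic1 target)

-- ===== LEMMAS AND PROOFS =====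

-- structural odd/even extraction (the meaning of the step-2 slices)
def pvOdds : List Int → List Int
  | [] => []
  | [_] => []
  | _ :: y :: t => y :: pvOdds t

def pvEvens : List Int → List Int
  | [] => []
  | [x] => [x]
  | x :: _ :: t => x :: pvEvens t

def pvShuffle (l : List Int) : List Int := pvOdds l ++ pvEvens l

theorem odds_aux (t : List Int) :
    List.filterMap (fun (x : Nat) => t[(1 + 2*(x:Int)).toNat]?) (List.range (t.length/2)) = pvOdds t := by
  induction t using pvOdds.induct with
  | case1 => rfl
  | case2 x => simp [pvOdds]
  | case3 a b t ih =>
    have hc : (a :: b :: t).length/2 = t.length/2 + 1 := by simp; omega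
    rw [hc, List.range_succ_eq_map, List.filterMap_cons, List.filterMap_map]
    have h0 : ((a :: b :: t)[(1 + 2*((0:Nat):Int)).toNat]?) = some b := by norm_num
    rw [h0]
    have hf : ∀ x ∈ List.range (t.length/2),
        ((fun (x : Nat) => (a :: b :: t)[(1 + 2*(x:Int)).toNat]?) ∘ Nat.succ) x
          = (fun (x : Nat) => t[(1 + 2*(x:Int)).toNat]?) x := by
      intro x _
      have h1 : (1 + 2*((Nat.succ x : Nat):Int)).toNat = ((1 + 2*(x:Int)).toNat) + 1 + 1 := by
        push_cast; omega
      simp only [Function.comp, h1, List.getElem?_cons_succ]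
    rw [List.filterMap_congr hf, ih, pvOdds]

theorem evens_aux (t : List Int) :
    List.filterMap (fun (x : Nat) => t[(2*(x:Int)).toNat]?) (List.range ((t.length+1)/2)) = pvEvens t := by
  induction t using pvEvens.induct with
  | case1 => rfl
  | case2 x => simp [pvEvens]
  | case3 a b t ih =>
    have hc : ((a :: b :: t).length+1)/2 = (t.length+1)/2 + 1 := by simp; omega
    rw [hc, List.range_succ_eq_map, List.filterMap_cons, List.filterMap_map]
    have h0 : ((a :: b :: t)[(2*((0:Nat):Int)).toNat]?) = some a := by norm_num
    rw [h0]
    have hf : ∀ x ∈ List.range ((t.length+1)/2),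
        ((fun (x : Nat) => (a :: b :: t)[(2*(x:Int)).toNat]?) ∘ Nat.succ) x
          = (fun (x : Nat) => t[(2*(x:Int)).toNat]?) x := by
      intro x _
      have h1 : (2*((Nat.succ x : Nat):Int)).toNat = ((2*(x:Int)).toNat) + 1 + 1 := by
        push_cast; omega
      simp only [Function.comp, h1, List.getElem?_cons_succ]
    rw [List.filterMap_congr hf, ih, pvEvens]

theorem slice?_from1_step2 (xs : List Int) :
    PySem.List.slice? xs (some 1) none 2 = some (pvOdds xs) := by
  rw [← odds_aux]
  simp only [PySem.List.slice?, PySem.List.sliceIndices]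
  cases xs with
  | nil => rfl
  | cons a t =>
    norm_num
    have hc : (if 0 < t.length then (((t.length:Int) + 2 - 1) / 2).toNat else 0) = (t.length + 1) / 2 := by
      split_ifs with h <;> omega
    rw [hc]

theorem slice?_all_step2 (xs : List Int) :
    PySem.List.slice? xs none none 2 = some (pvEvens xs) := by
  rw [← evens_aux]
  simp only [PySem.List.slice?, PySem.List.sliceIndices]
  norm_num
  have hc : (if 0 < xs.length then (((xs.length:Int) + 2 - 1) / 2).toNat else 0) = (xs.length + 1) / 2 := by
    split_ifs with h <;> omega
  rw [hc]

theorem pyShuffle_eq (xs : List Int) : pyShuffle xs = pvShuffle xs := by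
  simp [pyShuffle, pvShuffle, slice?_from1_step2, slice?_all_step2]

theorem len_odds_evens (xs : List Int) :
    (pvOdds xs).length + (pvEvens xs).length = xs.length := by
  induction xs using pvOdds.induct with
  | case1 => rfl
  | case2 x => rfl
  | case3 a b t ih => simp [pvOdds, pvEvens] at ih ⊢; omega

theorem length_pvShuffle (xs : List Int) : (pvShuffle xs).length = xs.length := by
  simp [pvShuffle]; rw [len_odds_evens]

-- the canonical result of the shuffle process with chunk size km1+1
def buildC (km1 : Nat) (nums : List Int) : List Int :=
  if h : nums = [] then []
  else
    let m := pvShuffle nums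
    m.take (km1+1) ++ buildC km1 (m.drop (km1+1))
termination_by nums.length
decreasing_by
  have hl := length_pvShuffle nums
  cases nums with
  | nil => exact absurd rfl h
  | cons a t => simp [hl]

theorem buildC_nil (km1 : Nat) : buildC km1 [] = [] := by
  simp [buildC]

theorem buildC_cons (km1 : Nat) (nums : List Int) (h : nums ≠ []) :
    buildC km1 nums = (pvShuffle nums).take (km1+1) ++ buildC km1 ((pvShuffle nums).drop (km1+1)) := by
  rw [buildC]; simp [h]

-- prefix of the result is the prefix of the first shuffle
theorem buildC_take (km1 : Nat) (nums rest : List Int) (h : buildC km1 nums = rest) :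
    rest.take (km1+1) = (pvShuffle nums).take (km1+1) := by
  by_cases hn : nums = []
  · subst hn; rw [buildC_nil] at h; subst h; simp [pvShuffle, pvOdds, pvEvens]
  · rw [buildC_cons km1 nums hn] at h
    subst h
    by_cases hlen : km1 + 1 ≤ (pvShuffle nums).length
    · rw [List.take_append_of_le_length (by simpa using hlen)]
      rw [List.take_take]; simp
    · have hdrop : (pvShuffle nums).drop (km1+1) = [] := by
        apply List.drop_eq_nil_of_le; omega
      rw [hdrop, buildC_nil, List.append_nil, List.take_take]; simp

theorem helpLoopA_eq (fuel : Nat) (k : Int) (nums res : List Int)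
    (hk : 1 ≤ k) (hf : nums.length < fuel) :
    helpLoopA fuel k nums res = res ++ buildC (k.toNat - 1) nums := by
  induction fuel generalizing nums res with
  | zero => omega
  | succ fuel ih =>
    by_cases hn : nums = []
    · subst hn; simp [helpLoopA, buildC_nil]
    · rw [helpLoopA]
      have hne : nums.isEmpty = false := by simp [hn]
      rw [hne]
      simp only [Bool.false_eq_true, if_false]
      rw [pyShuffle_eq]
      have hkk : k.toNat = (k.toNat - 1) + 1 := by omega
      rw [PySem.List.slice_to _ (by omega), PySem.List.slice_from _ (by omega)]
      have hlen : (pvShuffle nums).length = nums.length := length_pvShuffle nums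
      have h0 : 0 < nums.length := List.length_pos_of_ne_nil hn
      have hlt : ((pvShuffle nums).drop k.toNat).length < fuel := by
        rw [List.length_drop, hlen]; omega
      rw [ih _ _ hlt, List.append_assoc]
      rw [buildC_cons _ _ hn, hkk]
      simp only [Nat.add_sub_cancel]

theorem verifyLoopB_iff (fuel : Nat) (k : Int) (nums rest : List Int)
    (hk : 1 ≤ k) (hf : nums.length < fuel) :
    verifyLoopB fuel k nums rest = true ↔ buildC (k.toNat - 1) nums = rest := by
  induction fuel generalizing nums rest with
  | zero => omega
  | succ fuel ih =>
    by_cases hn : nums = []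
    · subst hn
      rw [verifyLoopB, buildC_nil]
      simp only [List.isEmpty_nil, if_true]
      rw [List.isEmpty_iff]
      exact eq_comm
    · rw [verifyLoopB]
      have hne : nums.isEmpty = false := by simp [hn]
      rw [hne]
      simp only [Bool.false_eq_true, if_false]
      rw [pyShuffle_eq]
      have hkk : k.toNat = (k.toNat - 1) + 1 := by omega
      rw [PySem.List.slice_to _ (by omega), PySem.List.slice_from _ (by omega),
          PySem.List.slice_to _ (by omega), PySem.List.slice_from _ (by omega)]
      have hlen : (pvShuffle nums).length = nums.length := length_pvShuffle nums
      have h0 : 0 < nums.length := List.length_pos_of_ne_nil hn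
      have hlt : ((pvShuffle nums).drop k.toNat).length < fuel := by
        rw [List.length_drop, hlen]; omega
      by_cases heq : (pvShuffle nums).take k.toNat = rest.take k.toNat
      · rw [if_pos heq, ih _ _ hlt]
        constructor
        · intro hb
          rw [buildC_cons _ _ hn, ← hkk, heq, hb]
          exact List.take_append_drop _ _
        · intro hb
          rw [buildC_cons _ _ hn, ← hkk] at hb
          by_cases hl : k.toNat ≤ (pvShuffle nums).length
          · have hlt' : (List.take k.toNat (pvShuffle nums)).length = k.toNat := by
              rw [List.length_take]; omega
            have hdl := List.drop_left (l₁ := List.take k.toNat (pvShuffle nums))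
              (l₂ := buildC (k.toNat - 1) ((pvShuffle nums).drop k.toNat))
            rw [hlt'] at hdl
            rw [← hb, hdl]
          · have hdrop : (pvShuffle nums).drop k.toNat = [] := by
              apply List.drop_eq_nil_of_le; omega
            rw [hdrop, buildC_nil, List.append_nil] at hb
            rw [hdrop, buildC_nil, ← hb]
            rw [List.drop_eq_nil_of_le (by rw [List.length_take]; omega)]
      · rw [if_neg heq]
        simp only [Bool.false_eq_true, false_iff]
        intro hb
        apply heq
        have := buildC_take (k.toNat - 1) nums rest hb
        rw [← hkk] at this
        exact this.symm

theorem prefLen_ge (m : Nat) (xs ys : List Int)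
    (h : xs.take m = ys.take m) (hm : m ≤ xs.length) : m ≤ prefLen xs ys := by
  induction xs generalizing ys m with
  | nil =>
    have h0 : m = 0 := by simpa using hm
    subst h0; exact Nat.zero_le _
  | cons a xs ih =>
    cases m with
    | zero => omega
    | succ m =>
      cases ys with
      | nil => simp at h
      | cons b ys =>
        simp only [List.take_succ_cons, List.cons.injEq] at h
        obtain ⟨hab, ht⟩ := h
        subst hab
        have hp : prefLen (a :: xs) (a :: ys) = prefLen xs ys + 1 := by simp [prefLen]
        rw [hp]
        have := ih m ys ht (by simp at hm; omega)
        omega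

-- ===== VERDICT (by name: the statement is the Claim_ definition above) =====
theorem helpA_iff (target : List Int) (k : Int) (hk : 1 ≤ k) :
    helpA target k = true ↔
      buildC (k.toNat - 1) (PySem.List.sorted target (fun x => x) false) = target := by
  unfold helpA
  rw [decide_eq_true_eq]
  rw [helpLoopA_eq _ _ _ _ hk (by omega)]
  simp

theorem isMagic1_spec : Claim_equal_isMagic1 := by
  intro target _
  unfold Spec_isMagic1 isMagic1 isMagic1_alt
  rw [Bool.eq_iff_iff]
  simp only [List.any_eq_true]
  rw [pyShuffle_eq]
  constructor
  · rintro ⟨k, hkmem, hk⟩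
    rw [PySem.List.mem_pyRange_one] at hkmem
    obtain ⟨hk1, hkn⟩ := hkmem
    rw [helpA_iff target k hk1] at hk
    have hK : k.toNat - 1 + 1 = k.toNat := by omega
    have hslen : (PySem.List.sorted target (fun x => x) false).length = target.length :=
      PySem.List.length_sorted _ _ _
    have htake := buildC_take _ _ _ hk
    rw [hK] at htake
    have hp : k.toNat ≤ prefLen (pvShuffle (PySem.List.sorted target (fun x => x) false)) target := by
      apply prefLen_ge _ _ _ htake.symm
      rw [length_pvShuffle, hslen]; omega
    refine ⟨k, ?_, ?_⟩
    · rw [PySem.List.mem_pyRange_neg_one]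
      refine ⟨by omega, le_min (by omega) (by omega)⟩
    · exact (verifyLoopB_iff _ _ _ _ hk1 (by omega)).mpr hk
  · rintro ⟨k, hkmem, hk⟩
    rw [PySem.List.mem_pyRange_neg_one] at hkmem
    obtain ⟨hk0, hkb⟩ := hkmem
    have hk1 : 1 ≤ k := by omega
    have hkn : k < (target.length : Int) := by
      have := le_trans hkb (min_le_right _ _)
      omega
    rw [verifyLoopB_iff _ _ _ _ hk1 (by omega)] at hk
    refine ⟨k, ?_, ?_⟩
    · rw [PySem.List.mem_pyRange_one]; exact ⟨hk1, hkn⟩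
    · exact (helpA_iff target k hk1).mpr hk
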